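-- pv_equiv track=rewrite | github.com/BIONF/taXaminer-dashboard | required_functionalities.py | createHovertemplate
-- ===== SOURCE A (Python) =====
-- def createHovertemplate(hover_data, head_len=2, offset=0):
--     """ Generate a hovertemplate string for a 3d python dash graph.
--     :param hover_data:  List of values which are displayed by hovering.
--     Value names have to be part of data.columns
--     :param head_len:    Specifies how many values displayed in headline.
--     The rest will be in description list.
--     :param offset:      Hover data and custom data are stored in the same
--     custom data object. This simply offset can be used to ignore the origin
--     custom data.
--     :return:            Returns a string which can be used as a hovertemplate
--     """
--     result = ""
--     count = 0
--     for it in hover_data: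
--         if count < head_len:
--             result += "%{customdata[" + str(count + offset) + "]} <br>"
--         if count == head_len:
--             result += "<extra>" + it + " = %{customdata[" + \
--                       str(count + offset) + "]} <br>"
--         if count > head_len:
--             result += it + " = %{customdata[" + str(count + offset) + "]} <br>"
--         count += 1
--
--     if count > head_len:
--         result += "</extra>"
--     else:
--         result += "<extra></extra>"
--
--     return result
-- ===== SOURCE B (Python) =====
-- def createHovertemplate(hover_data, head_len=2, offset=0):
--     """Segment-based rebuild: headline fragments, optional pivot, tail, closing tag."""
--     n = len(hover_data)
--     parts = []
--     for i in range(min(max(head_len, 0), n)):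
--         parts.append("%{customdata[" + str(i + offset) + "]} <br>")
--     if 0 <= head_len < n:
--         parts.append("<extra>" + hover_data[head_len] +
--                      " = %{customdata[" + str(head_len + offset) + "]} <br>")
--     start = max(head_len + 1, 0)
--     for j, it in enumerate(hover_data[start:]):
--         parts.append(it + " = %{customdata[" + str(start + j + offset) + "]} <br>")
--     parts.append("</extra>" if n > head_len else "<extra></extra>")
--     return "".join(parts)
-- ===== Notes on version B (the rewrite author's own statement) =====
-- stated objective: alternative
-- what changed: Replaces A's single counting loop with three sequential branch tests per element by an index-segment construction: a headline range, one pivot lookup by index, a tail slice with enumerate, and a closing tag chosen by comparing len(hover_data) with head_len, all joined at the end.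
import Mathlib
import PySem

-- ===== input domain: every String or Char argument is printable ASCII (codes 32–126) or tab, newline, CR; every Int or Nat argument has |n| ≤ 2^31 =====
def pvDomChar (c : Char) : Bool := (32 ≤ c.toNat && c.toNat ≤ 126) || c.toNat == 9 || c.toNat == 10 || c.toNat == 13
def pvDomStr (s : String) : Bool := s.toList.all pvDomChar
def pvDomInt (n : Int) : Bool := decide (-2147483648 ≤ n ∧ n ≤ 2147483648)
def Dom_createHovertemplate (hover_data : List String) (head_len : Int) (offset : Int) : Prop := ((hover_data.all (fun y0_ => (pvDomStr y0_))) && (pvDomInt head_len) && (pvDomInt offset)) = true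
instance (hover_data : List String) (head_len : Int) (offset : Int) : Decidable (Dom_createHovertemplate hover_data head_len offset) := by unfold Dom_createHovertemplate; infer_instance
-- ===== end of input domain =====

-- B rebuilds the template by index segments (headline range, pivot, tail slice, closing tag)
-- instead of A's single counting loop with three branches; objective: alternative decomposition.

-- ===== PORT A =====
def createHovertemplate (hover_data : List String) (head_len : Int) (offset : Int) : String :=
  let st : String × Int := hover_data.foldl (fun st it =>
    let result := st.1
    let count := st.2
    let result := if count < head_len then
        result ++ "%{customdata[" ++ PySem.Int.toStr (count + offset) ++ "]} <br>" else result
    let result := if count = head_len then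
        result ++ "<extra>" ++ it ++ " = %{customdata[" ++ PySem.Int.toStr (count + offset) ++ "]} <br>" else result
    let result := if head_len < count then
        result ++ it ++ " = %{customdata[" ++ PySem.Int.toStr (count + offset) ++ "]} <br>" else result
    (result, count + 1)) ("", 0)
  if head_len < st.2 then st.1 ++ "</extra>" else st.1 ++ "<extra></extra>"

-- ===== PORT B =====
def createHovertemplate_alt (hover_data : List String) (head_len : Int) (offset : Int) : String :=
  let n : Int := (hover_data.length : Int)
  let parts : List String :=
    (PySem.List.pyRange 0 (min (max head_len 0) n) 1).map
      (fun i => "%{customdata[" ++ PySem.Int.toStr (i + offset) ++ "]} <br>")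
  let parts := if 0 ≤ head_len ∧ head_len < n then
      parts ++ ["<extra>" ++ PySem.List.pyGetD hover_data head_len "" ++
                " = %{customdata[" ++ PySem.Int.toStr (head_len + offset) ++ "]} <br>"]
    else parts
  let start := max (head_len + 1) 0
  let parts := parts ++
    (PySem.List.enumerate (PySem.List.slice hover_data (some start) none) 0).map
      (fun ji => ji.2 ++ " = %{customdata[" ++ PySem.Int.toStr (start + ji.1 + offset) ++ "]} <br>")
  let parts := parts ++ [if head_len < n then "</extra>" else "<extra></extra>"]
  PySem.Str.join "" parts

-- ===== PRECONDITION & SPEC =====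
def Spec_createHovertemplate (hover_data : List String) (head_len : Int) (offset : Int) (out : String) : Prop := out = createHovertemplate_alt hover_data head_len offset
instance (hover_data : List String) (head_len : Int) (offset : Int) (out : String) : Decidable (Spec_createHovertemplate hover_data head_len offset out) := by unfold Spec_createHovertemplate; infer_instance

-- ===== CLAIM (what is proved, stated in full; the proofs are below) =====
def Claim_equal_createHovertemplate : Prop := ∀ (hover_data : List String) (head_len : Int) (offset : Int), Dom_createHovertemplate hover_data head_len offset → Spec_createHovertemplate hover_data head_len offset (createHovertemplate hover_data head_len offset)

-- ===== LEMMAS AND PROOFS =====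

-- fragment builders shared by the two characterisations
def pvHd (o i : Int) : String := "%{customdata[" ++ PySem.Int.toStr (i + o) ++ "]} <br>"
def pvPiv (o i : Int) (x : String) : String :=
  "<extra>" ++ x ++ " = %{customdata[" ++ PySem.Int.toStr (i + o) ++ "]} <br>"
def pvTl (o i : Int) (x : String) : String :=
  x ++ " = %{customdata[" ++ PySem.Int.toStr (i + o) ++ "]} <br>"

-- the fragment list A's loop emits, one entry per element, counting from c
def partsA (h o : Int) : List String → Int → List String
  | [], _ => []
  | x :: r, c =>
    (if c < h then pvHd o c else if c = h then pvPiv o c x else pvTl o c x) :: partsA h o r (c + 1)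

-- plain left-to-right concatenation of fragments
def concatS : List String → String
  | [] => ""
  | x :: r => x ++ concatS r

-- B's three segments, generalised to a suffix l whose first element has absolute index c
def headSeg (h o : Int) (l : List String) (c : Int) : List String :=
  (PySem.List.pyRange c (min (max h c) (c + (l.length : Int))) 1).map (fun i => pvHd o i)

def pivSeg (h o : Int) (l : List String) (c : Int) : List String :=
  if c ≤ h ∧ h < c + (l.length : Int) then [pvPiv o h (PySem.List.pyGetD l (h - c) "")] else []

def tailSeg (h o : Int) (l : List String) (c : Int) : List String :=
  (PySem.List.enumerate (PySem.List.slice l (some (max (h + 1) c - c)) none) 0).map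
    (fun ji => pvTl o (max (h + 1) c + ji.1) ji.2)

theorem concatS_append (L1 L2 : List String) : concatS (L1 ++ L2) = concatS L1 ++ concatS L2 := by
  induction L1 with
  | nil => simp [concatS]
  | cons x r ih => simp [concatS, ih, String.append_assoc]

theorem join_empty_sep (L : List String) : PySem.Str.join "" L = concatS L := by
  induction L with
  | nil => simp [PySem.Str.join, PySem.Chars.join, List.intercalate, concatS]
  | cons x r ih =>
    have h : PySem.Str.join "" (x :: r) = x ++ PySem.Str.join "" r := by
      cases r with
      | nil => simp [PySem.Str.join, PySem.Chars.join, List.intercalate]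
      | cons y t => simp [PySem.Str.join, PySem.Chars.join, List.intercalate]
    rw [h, ih]; rfl

theorem enumerate_shift {α : Type} (l : List α) (s : Int) :
    PySem.List.enumerate l (s + 1) = (PySem.List.enumerate l s).map (fun p => (p.1 + 1, p.2)) := by
  induction l generalizing s with
  | nil => simp [PySem.List.enumerate_nil]
  | cons x r ih => simp [PySem.List.enumerate_cons, ih]

-- A's loop computes (res ++ concatS (partsA …), c + |l|)
theorem foldA (h o : Int) (l : List String) (res : String) (c : Int) :
    l.foldl (fun st it =>
      let result := st.1
      let count := st.2
      let result := if count < h then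
          result ++ "%{customdata[" ++ PySem.Int.toStr (count + o) ++ "]} <br>" else result
      let result := if count = h then
          result ++ "<extra>" ++ it ++ " = %{customdata[" ++ PySem.Int.toStr (count + o) ++ "]} <br>" else result
      let result := if h < count then
          result ++ it ++ " = %{customdata[" ++ PySem.Int.toStr (count + o) ++ "]} <br>" else result
      (result, count + 1)) (res, c)
    = (res ++ concatS (partsA h o l c), c + (l.length : Int)) := by
  induction l generalizing res c with
  | nil => simp [partsA, concatS]
  | cons x r ih =>
    simp only [List.foldl_cons, ih]
    rcases lt_trichotomy c h with hc | hc | hc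
    · simp only [partsA, concatS, if_pos hc, if_neg (by omega : ¬ (h < c)), if_neg (by omega : ¬ (c = h)), Prod.mk.injEq]
      refine ⟨by simp [pvHd, String.append_assoc], by push_cast [List.length_cons]; omega⟩
    · simp only [partsA, concatS, if_neg (by omega : ¬ (c < h)), if_pos hc, if_neg (by omega : ¬ (h < c)), Prod.mk.injEq]
      refine ⟨by simp [hc, pvPiv, String.append_assoc], by push_cast [List.length_cons]; omega⟩
    · simp only [partsA, concatS, if_neg (by omega : ¬ (c < h)), if_neg (by omega : ¬ (c = h)), if_pos hc, Prod.mk.injEq]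
      refine ⟨by simp [pvTl, String.append_assoc], by push_cast [List.length_cons]; omega⟩

-- the segment decomposition of A's fragment list
theorem segs_eq (h o : Int) (l : List String) (c : Int) :
    partsA h o l c = headSeg h o l c ++ pivSeg h o l c ++ tailSeg h o l c := by
  induction l generalizing c with
  | nil =>
    simp only [partsA, headSeg, pivSeg, tailSeg, List.length_nil, Nat.cast_zero, add_zero]
    rw [PySem.List.pyRange_one_eq_nil (by omega),
      PySem.List.slice_from _ (by omega : (0:Int) ≤ max (h + 1) c - c),
      if_neg (by omega : ¬ (c ≤ h ∧ h < c))]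
    simp [PySem.List.enumerate_nil]
  | cons x r ih =>
    rcases lt_trichotomy c h with hc | hc | hc
    · -- headline position: c < h
      have hhead : headSeg h o (x :: r) c = pvHd o c :: headSeg h o r (c + 1) := by
        simp only [headSeg, List.length_cons]
        rw [PySem.List.pyRange_one_cons (by push_cast [List.length_cons]; omega)]
        simp only [List.map_cons, List.cons.injEq, true_and]
        congr 2
        push_cast; omega
      have hpiv : pivSeg h o (x :: r) c = pivSeg h o r (c + 1) := by
        simp only [pivSeg, List.length_cons]
        have hcond : (c ≤ h ∧ h < c + ((r.length : Int) + 1)) ↔ (c + 1 ≤ h ∧ h < c + 1 + (r.length : Int)) := by omega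
        by_cases hb : c + 1 ≤ h ∧ h < c + 1 + (r.length : Int)
        · rw [if_pos (by push_cast [List.length_cons]; omega), if_pos hb]
          have : PySem.List.pyGetD (x :: r) (h - c) "" = PySem.List.pyGetD r (h - (c + 1)) "" := by
            have h1 : h - c = ((h - c).toNat : Int) := by omega
            rw [h1, PySem.List.pyGetD_natCast]
            have h2 : h - (c + 1) = ((h - c).toNat - 1 : Nat) := by omega
            rw [h2, PySem.List.pyGetD_natCast]
            have h3 : ∃ m : Nat, (h - c).toNat = m + 1 := ⟨(h - c).toNat - 1, by omega⟩
            obtain ⟨m, hm⟩ := h3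
            simp [hm]
          rw [this]
        · rw [if_neg (by push_cast [List.length_cons]; omega), if_neg hb]
      have htail : tailSeg h o (x :: r) c = tailSeg h o r (c + 1) := by
        simp only [tailSeg]
        have hm1 : max (h + 1) c = h + 1 := by omega
        have hm2 : max (h + 1) (c + 1) = h + 1 := by omega
        rw [hm1, hm2,
          PySem.List.slice_from _ (by omega : (0:Int) ≤ h + 1 - c),
          PySem.List.slice_from _ (by omega : (0:Int) ≤ h + 1 - (c + 1))]
        have hdrop : List.drop (h + 1 - c).toNat (x :: r) = List.drop (h + 1 - (c + 1)).toNat r := by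
          have : (h + 1 - c).toNat = (h + 1 - (c + 1)).toNat + 1 := by omega
          simp [this]
        rw [hdrop]
      rw [hhead, hpiv, htail]
      simp only [partsA, if_pos hc, ih (c + 1)]
      simp
    · -- pivot position: c = h
      subst hc
      have hhead : headSeg c o (x :: r) c = [] := by
        simp only [headSeg]
        rw [PySem.List.pyRange_one_eq_nil (by omega)]
        simp
      have hheadr : headSeg c o r (c + 1) = [] := by
        simp only [headSeg]
        rw [PySem.List.pyRange_one_eq_nil (by omega)]
        simp
      have hpiv : pivSeg c o (x :: r) c = [pvPiv o c x] := by
        simp only [pivSeg, List.length_cons]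
        rw [if_pos (show c ≤ c ∧ c < c + ((r.length + 1 : Nat) : Int) by push_cast; omega)]
        simp [PySem.List.pyGetD_zero_cons]
      have hpivr : pivSeg c o r (c + 1) = [] := by
        simp only [pivSeg]
        rw [if_neg (by omega)]
      have htail : tailSeg c o (x :: r) c = tailSeg c o r (c + 1) := by
        simp only [tailSeg]
        have hm1 : max (c + 1) c = c + 1 := by omega
        have hm2 : max (c + 1) (c + 1) = c + 1 := by omega
        rw [hm1, hm2, PySem.List.slice_from _ (by omega : (0:Int) ≤ c + 1 - c),
          PySem.List.slice_from _ (by omega : (0:Int) ≤ c + 1 - (c + 1))]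
        have h1 : (c + 1 - c).toNat = 1 := by omega
        have h2 : (c + 1 - (c + 1)).toNat = 0 := by omega
        simp
      rw [hhead, hpiv, htail]
      simp only [partsA, if_neg (by omega : ¬ (c < c)), ih (c + 1), hheadr, hpivr]
      simp
    · -- tail position: h < c
      have hhead : headSeg h o (x :: r) c = [] := by
        simp only [headSeg]
        rw [PySem.List.pyRange_one_eq_nil (by simp; omega)]
        simp
      have hheadr : headSeg h o r (c + 1) = [] := by
        simp only [headSeg]
        rw [PySem.List.pyRange_one_eq_nil (by simp; omega)]
        simp
      have hpiv : pivSeg h o (x :: r) c = [] := by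
        simp only [pivSeg]; rw [if_neg (by omega)]
      have hpivr : pivSeg h o r (c + 1) = [] := by
        simp only [pivSeg]; rw [if_neg (by omega)]
      have htail : tailSeg h o (x :: r) c = pvTl o c x :: tailSeg h o r (c + 1) := by
        simp only [tailSeg]
        have hm1 : max (h + 1) c = c := by omega
        have hm2 : max (h + 1) (c + 1) = c + 1 := by omega
        rw [hm1, hm2, PySem.List.slice_from _ (by omega : (0:Int) ≤ c - c),
          PySem.List.slice_from _ (by omega : (0:Int) ≤ c + 1 - (c + 1))]
        have h1 : (c - c).toNat = 0 := by omega
        have h2 : (c + 1 - (c + 1)).toNat = 0 := by omega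
        simp only [h1, h2, List.drop_zero]
        rw [PySem.List.enumerate_cons, enumerate_shift]
        have harg : ∀ p : Int × String, pvTl o (c + (p.1 + 1)) p.2 = pvTl o (c + 1 + p.1) p.2 := by
          intro p; congr 1; ring
        simp [harg]
      rw [hhead, hpiv, htail]
      simp only [partsA, if_neg (by omega : ¬ (c < h)), if_neg (by omega : ¬ (c = h)), ih (c + 1), hheadr, hpivr]
      simp

-- ===== VERDICT (by name: the statement is the Claim_ definition above) =====
theorem A_char (l : List String) (h o : Int) :
    createHovertemplate l h o =
      concatS (partsA h o l 0) ++
        (if h < (l.length : Int) then "</extra>" else "<extra></extra>") := by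
  unfold createHovertemplate
  rw [foldA h o l "" 0]
  simp only [String.empty_append, zero_add]
  split_ifs <;> rfl

theorem B_char (l : List String) (h o : Int) :
    createHovertemplate_alt l h o =
      concatS (headSeg h o l 0 ++ pivSeg h o l 0 ++ tailSeg h o l 0 ++
        [if h < (l.length : Int) then "</extra>" else "<extra></extra>"]) := by
  unfold createHovertemplate_alt
  rw [join_empty_sep]
  simp only [headSeg, pivSeg, tailSeg, pvHd, pvPiv, pvTl, zero_add, sub_zero]
  split_ifs <;> simp [List.append_assoc]

theorem createHovertemplate_spec : Claim_equal_createHovertemplate := by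
  intro hover_data head_len offset _
  unfold Spec_createHovertemplate
  rw [A_char, B_char, segs_eq head_len offset hover_data 0]
  simp only [concatS_append, List.append_assoc]
  simp [concatS, String.append_empty, String.append_assoc]
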